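-- pv_equiv track=rewrite | github.com/linhnt31/Python | Competitive Progamming/CodeSignal/Tourements/3_4_2019.py | reverseToSort
-- ===== SOURCE A (Python) =====
-- def reverseToSort(inputArray):
--
--     for i in range(len(inputArray)):
--         for j in range(i + 1, len(inputArray) + 1):
--             left = inputArray[:i]
--             middle = inputArray[i:j]
--             middle.reverse()
--             right = inputArray[j:]
--             result = []
--             correct = True
--
--             result = left + middle + right
--
--             for k in range(1, len(result)):
--                 if result[k - 1] >= result[k]:
--                     correct = False
--                     break
--             if correct:
--                 return True
--     return False
-- ===== SOURCE B (Python) =====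
-- def reverseToSort(inputArray):
--     # O(n): collect positions of descent; if none, already increasing; otherwise
--     # they must form one contiguous block whose reversal fixes the array.
--     bad = [k for k in range(1, len(inputArray)) if inputArray[k - 1] >= inputArray[k]]
--     if not bad:
--         return True
--     if bad != list(range(bad[0], bad[-1] + 1)):
--         return False
--     i, j = bad[0] - 1, bad[-1] + 1
--     b = inputArray[:i] + inputArray[i:j][::-1] + inputArray[j:]
--     return all(b[k] < b[k + 1] for k in range(len(b) - 1))
-- ===== Notes on version B (the rewrite author's own statement) =====
-- stated objective: faster
-- what changed: Replaced A's brute force over all O(n^2) subarray reversals (each verified in O(n)) with a single linear pass that collects the descent positions, checks they form one contiguous block, reverses just that block and verifies the result once.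
-- intended difference: On the empty array A returns False (its outer loop never runs) while B returns True, the intended answer since the empty array is already sorted. — e.g. on reverseToSort([]): A returns false, B returns true
import Mathlib
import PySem

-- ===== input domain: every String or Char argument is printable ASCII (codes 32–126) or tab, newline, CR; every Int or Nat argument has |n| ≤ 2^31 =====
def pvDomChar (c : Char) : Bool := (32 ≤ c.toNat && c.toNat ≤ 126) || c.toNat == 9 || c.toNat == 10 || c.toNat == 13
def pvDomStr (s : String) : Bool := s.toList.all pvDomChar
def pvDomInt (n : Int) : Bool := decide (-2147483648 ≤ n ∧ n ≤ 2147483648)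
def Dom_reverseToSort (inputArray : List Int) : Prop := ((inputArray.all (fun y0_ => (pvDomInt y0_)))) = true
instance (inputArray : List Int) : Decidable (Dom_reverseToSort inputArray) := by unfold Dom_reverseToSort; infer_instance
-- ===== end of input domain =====

-- B replaces A's brute force over all O(n^2) reversals (each checked in O(n)) by a single
-- O(n) pass: locate the descent positions, reverse the one candidate block, verify once.

-- ===== PORT A =====
-- inner k-loop of A: 'correct' stays true iff no adjacent pair has result[k-1] >= result[k]
-- (indices k-1, k are always in range, so pyGetD's default is never used)
def pyCheckA (r : List Int) : Bool :=
  (PySem.List.pyRange 1 (r.length : Int) 1).all fun k =>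
    !(decide (PySem.List.pyGetD r (k - 1) 0 ≥ PySem.List.pyGetD r k 0))

def reverseToSort (inputArray : List Int) : Bool :=
  (PySem.List.pyRange 0 (inputArray.length : Int) 1).any fun i =>
    (PySem.List.pyRange (i + 1) ((inputArray.length : Int) + 1) 1).any fun j =>
      let left := PySem.List.slice inputArray none (some i)
      let middle := (PySem.List.slice inputArray (some i) (some j)).reverse  -- middle.reverse()
      let right := PySem.List.slice inputArray (some j) none
      pyCheckA (left ++ middle ++ right)

-- ===== PORT B =====
-- bad = [k for k in range(1, len(a)) if a[k-1] >= a[k]]   (indices always in range)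
def badListB (a : List Int) : List Int :=
  (PySem.List.pyRange 1 (a.length : Int) 1).filter fun k =>
    decide (PySem.List.pyGetD a (k - 1) 0 ≥ PySem.List.pyGetD a k 0)

-- b = a[:i] + a[i:j][::-1] + a[j:]   ([::-1] is List.reverse)
def candB (a : List Int) (i j : Int) : List Int :=
  PySem.List.slice a none (some i) ++ (PySem.List.slice a (some i) (some j)).reverse ++
    PySem.List.slice a (some j) none

-- all(b[k] < b[k+1] for k in range(len(b) - 1))
def pyCheckB (b : List Int) : Bool :=
  (PySem.List.pyRange 0 ((b.length : Int) - 1) 1).all fun k =>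
    decide (PySem.List.pyGetD b k 0 < PySem.List.pyGetD b (k + 1) 0)

def reverseToSort_alt (inputArray : List Int) : Bool :=
  let bad := badListB inputArray
  if bad = [] then true
  else if bad ≠ PySem.List.pyRange (PySem.List.pyGetD bad 0 0) (PySem.List.pyGetD bad (-1) 0 + 1) 1 then false
  else pyCheckB (candB inputArray (PySem.List.pyGetD bad 0 0 - 1) (PySem.List.pyGetD bad (-1) 0 + 1))

-- ===== PRECONDITION & SPEC =====
-- On the empty array A returns False (its outer loop never runs) while B returns True,
-- the intended answer since the empty array is already sorted.
def D_reverseToSort (inputArray : List Int) : Prop := inputArray = []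
instance (inputArray : List Int) : Decidable (D_reverseToSort inputArray) := by
  unfold D_reverseToSort; infer_instance

def Spec_reverseToSort (inputArray : List Int) (out : Bool) : Prop :=
  ¬ D_reverseToSort inputArray → out = reverseToSort_alt inputArray
instance (inputArray : List Int) (out : Bool) : Decidable (Spec_reverseToSort inputArray out) := by
  unfold Spec_reverseToSort; infer_instance

def pvDiffWitness_reverseToSort : List Int := []
def pvDiffWitnessOut_reverseToSort : Bool × Bool := (false, true)

-- ===== CLAIM (what is proved, stated in full; the proofs are below) =====
def Claim_unchanged_reverseToSort : Prop := ∀ (inputArray : List Int), Dom_reverseToSort inputArray → Spec_reverseToSort inputArray (reverseToSort inputArray)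
def Claim_changed_reverseToSort : Prop := Dom_reverseToSort (pvDiffWitness_reverseToSort) ∧ D_reverseToSort (pvDiffWitness_reverseToSort) ∧ reverseToSort (pvDiffWitness_reverseToSort) = pvDiffWitnessOut_reverseToSort.1 ∧ reverseToSort_alt (pvDiffWitness_reverseToSort) = pvDiffWitnessOut_reverseToSort.2 ∧ pvDiffWitnessOut_reverseToSort.1 ≠ pvDiffWitnessOut_reverseToSort.2
def Claim_exact_reverseToSort : Prop := ∀ (inputArray : List Int), Dom_reverseToSort inputArray → D_reverseToSort inputArray → reverseToSort inputArray ≠ reverseToSort_alt inputArray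

-- ===== LEMMAS AND PROOFS =====

-- the reversed-segment candidate, in take/drop form
def revSeg (a : List Int) (i j : ℕ) : List Int :=
  a.take i ++ ((a.drop i).take (j - i)).reverse ++ a.drop j

-- adjacent strict increase
def AdjInc (l : List Int) : Prop := ∀ m : ℕ, (h : m + 1 < l.length) → l[m] < l[m + 1]

-- position in revSeg a i j holding a[m]
def pos (i j m : ℕ) : ℕ := if m < i then m else if m < j then i + j - 1 - m else m

theorem revSeg_length (a : List Int) (i j : ℕ) (hij : i ≤ j) (hj : j ≤ a.length) :
    (revSeg a i j).length = a.length := by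
  simp [revSeg]; omega

theorem revSeg_get? (a : List Int) (i j m : ℕ) (hij : i ≤ j) (hj : j ≤ a.length)
    (hm : m < a.length) :
    (revSeg a i j)[m]? = if m < i then a[m]? else if m < j then a[i + j - 1 - m]? else a[m]? := by
  have hti : (a.take i).length = i := by simp; omega
  have hmid : (((a.drop i).take (j-i)).reverse).length = j - i := by simp; omega
  rw [revSeg, List.append_assoc, List.getElem?_append, hti]
  by_cases h1 : m < i
  · simp [h1]
  · rw [if_neg h1, List.getElem?_append, hmid]
    by_cases h2 : m < j
    · rw [if_pos (by omega), if_neg h1, if_pos h2,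
        List.getElem?_reverse (by simp; omega), List.getElem?_take, if_pos (by simp; omega),
        List.getElem?_drop]
      congr 1
      simp
      omega
    · rw [if_neg (by omega), if_neg h1, if_neg h2, List.getElem?_drop]
      congr 1
      omega

theorem pos_lt (i j m n : ℕ) (hj : j ≤ n) (hm : m < n) : pos i j m < n := by
  unfold pos; split_ifs <;> omega

theorem r_pos (a : List Int) (i j m : ℕ) (hij : i ≤ j) (hj : j ≤ a.length)
    (hm : m < a.length) : (revSeg a i j)[pos i j m]? = a[m]? := by
  unfold pos
  split_ifs with h1 h2
  · rw [revSeg_get? a i j m hij hj hm, if_pos h1]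
  · rw [revSeg_get? a i j (i+j-1-m) hij hj (by omega), if_neg (by omega), if_pos (by omega)]
    congr 1
    omega
  · rw [revSeg_get? a i j m hij hj hm, if_neg h1, if_neg h2]

theorem key_mono (a : List Int) (i j : ℕ) (hij : i ≤ j) (hj : j ≤ a.length)
    (hr : AdjInc (revSeg a i j)) (p q : ℕ) (hp : p < a.length) (hq : q < a.length)
    (hpq : pos i j p < pos i j q) : a[p] < a[q] := by
  have hlen := revSeg_length a i j hij hj
  have hchain : List.IsChain (· < ·) (revSeg a i j) := List.isChain_iff_getElem.mpr (fun m h => hr m h)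
  have hm := List.pairwise_iff_getElem.mp hchain.pairwise (pos i j p) (pos i j q)
      (by rw [hlen]; exact pos_lt i j p a.length hj hp)
      (by rw [hlen]; exact pos_lt i j q a.length hj hq) hpq
  have e1 := r_pos a i j p hij hj hp
  have e2 := r_pos a i j q hij hj hq
  rw [List.getElem?_eq_getElem (by rw [hlen]; exact pos_lt i j p a.length hj hp),
      List.getElem?_eq_getElem hp] at e1
  rw [List.getElem?_eq_getElem (by rw [hlen]; exact pos_lt i j q a.length hj hq),
      List.getElem?_eq_getElem hq] at e2
  rw [Option.some_inj] at e1 e2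
  rw [e1, e2] at hm
  exact hm

theorem bad_char (a : List Int) (i j : ℕ) (hij : i < j) (hj : j ≤ a.length)
    (hr : AdjInc (revSeg a i j)) (k : ℕ) (hk0 : 0 < k) (hk : k < a.length) :
    (a[k - 1]'(by omega) ≥ a[k]) ↔ (i < k ∧ k < j) := by
  constructor
  · intro hge
    by_contra hnot
    have hlt := key_mono a i j (le_of_lt hij) hj hr (k-1) k (by omega) hk
      (by unfold pos; split_ifs <;> omega)
    exact absurd hlt (not_lt.mpr hge)
  · rintro ⟨h1, h2⟩
    have hlt := key_mono a i j (le_of_lt hij) hj hr k (k-1) hk (by omega)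
      (by unfold pos; split_ifs <;> omega)
    exact le_of_lt hlt

theorem adj_elem (r : List Int) (k : Int) (hk1 : 1 ≤ k) (hk2 : k < (r.length : Int)) :
    (!(decide (PySem.List.pyGetD r (k - 1) 0 ≥ PySem.List.pyGetD r k 0))) = true ↔
      (r[(k-1).toNat]'(by omega) < r[k.toNat]'(by omega)) := by
  rw [PySem.List.pyGetD_eq_getElem r 0 (i := k - 1) (by omega) (by omega),
      PySem.List.pyGetD_eq_getElem r 0 (i := k) (by omega) (by omega)]
  simp

theorem checkA_iff (r : List Int) : pyCheckA r = true ↔ AdjInc r := by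
  unfold pyCheckA AdjInc
  rw [List.all_eq_true]
  constructor
  · intro h m hm
    have hmem : ((m : Int) + 1) ∈ PySem.List.pyRange 1 (r.length : Int) 1 := by
      rw [PySem.List.mem_pyRange_one]; omega
    have h2 := (adj_elem r ((m:Int)+1) (by omega) (by omega)).mp (h _ hmem)
    have e1 : ((m:Int)+1-1).toNat = m := by omega
    have e2 : ((m:Int)+1).toNat = m + 1 := by omega
    simp only [e1, e2] at h2
    exact h2
  · intro h k hk
    obtain ⟨hk1, hk2⟩ := PySem.List.mem_pyRange_one.mp hk
    rw [adj_elem r k hk1 hk2]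
    have h2 := h ((k-1).toNat) (by omega)
    convert h2 using 2
    all_goals omega

theorem checkB_iff (b : List Int) : pyCheckB b = true ↔ AdjInc b := by
  unfold pyCheckB
  rw [List.all_eq_true]
  constructor
  · intro h m hm
    have hmem : (m : Int) ∈ PySem.List.pyRange 0 ((b.length : Int) - 1) 1 := by
      rw [PySem.List.mem_pyRange_one]; omega
    have h2 := h _ hmem
    rw [PySem.List.pyGetD_eq_getElem b 0 (i := (m:Int)) (by omega) (by omega),
        PySem.List.pyGetD_eq_getElem b 0 (i := (m:Int) + 1) (by omega) (by omega),
        decide_eq_true_eq] at h2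
    convert h2 using 2
  · intro h k hk
    obtain ⟨hk1, hk2⟩ := PySem.List.mem_pyRange_one.mp hk
    rw [PySem.List.pyGetD_eq_getElem b 0 (i := k) (by omega) (by omega),
        PySem.List.pyGetD_eq_getElem b 0 (i := k + 1) (by omega) (by omega),
        decide_eq_true_eq]
    have h2 := h k.toNat (by omega)
    convert h2 using 2
    all_goals omega

theorem slices_int (a : List Int) (i j : Int) (h0 : 0 ≤ i) (h1 : i ≤ j) :
    PySem.List.slice a none (some i) ++ (PySem.List.slice a (some i) (some j)).reverse ++
      PySem.List.slice a (some j) none = revSeg a i.toNat j.toNat := by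
  rw [PySem.List.slice_to a h0, PySem.List.slice_toNat a h0 (by omega),
      PySem.List.slice_from a (by omega), revSeg]

theorem A_iff (a : List Int) : reverseToSort a = true ↔
    ∃ i j : ℕ, i < a.length ∧ i < j ∧ j ≤ a.length ∧ AdjInc (revSeg a i j) := by
  unfold reverseToSort
  rw [List.any_eq_true]
  constructor
  · rintro ⟨i, hi, hj⟩
    rw [List.any_eq_true] at hj
    obtain ⟨j, hjm, hcheck⟩ := hj
    obtain ⟨hi1, hi2⟩ := PySem.List.mem_pyRange_one.mp hi
    obtain ⟨hj1, hj2⟩ := PySem.List.mem_pyRange_one.mp hjm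
    simp only at hcheck
    rw [slices_int a i j (by omega) (by omega)] at hcheck
    exact ⟨i.toNat, j.toNat, by omega, by omega, by omega, (checkA_iff _).mp hcheck⟩
  · rintro ⟨i, j, h1, h2, h3, hinc⟩
    refine ⟨(i : Int), PySem.List.mem_pyRange_one.mpr (by omega), ?_⟩
    rw [List.any_eq_true]
    refine ⟨(j : Int), PySem.List.mem_pyRange_one.mpr (by omega), ?_⟩
    simp only
    rw [slices_int a (i : Int) (j : Int) (by omega) (by omega)]
    rw [Int.toNat_natCast, Int.toNat_natCast]
    exact (checkA_iff _).mpr hinc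

theorem filter_pyRange_interval (p : Int → Bool) (m : ℕ) :
    ∀ (lo c d : Int), lo ≤ c → c ≤ d → d ≤ lo + m →
    (∀ x, lo ≤ x → x < lo + m → (p x = true ↔ c ≤ x ∧ x < d)) →
    (PySem.List.pyRange lo (lo + (m : Int)) 1).filter p = PySem.List.pyRange c d 1 := by
  induction m with
  | zero =>
    intro lo c d h1 h2 h3 _
    rw [PySem.List.pyRange_one_eq_nil (by omega), PySem.List.pyRange_one_eq_nil (by omega)]
    simp
  | succ m ih =>
    intro lo c d h1 h2 h3 hp
    have hsplit : lo + (((m+1) : ℕ) : Int) = (lo + 1) + (m : ℕ) := by push_cast; ring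
    rw [PySem.List.pyRange_one_cons (by omega), List.filter_cons]
    by_cases hplo : p lo = true
    · have hcd := (hp lo le_rfl (by omega)).mp hplo
      have hc : c = lo := by omega
      subst hc
      rw [if_pos hplo, PySem.List.pyRange_one_cons (show c < d by omega)]
      congr 1
      rw [hsplit]
      exact ih (c + 1) (c + 1) d (by omega) (by omega) (by omega)
        (fun x hx1 hx2 => by rw [hp x (by omega) (by omega)]; omega)
    · have hnot : ¬ (c ≤ lo ∧ lo < d) := fun h => hplo ((hp lo le_rfl (by omega)).mpr h)
      rw [eq_false_of_ne_true hplo, if_neg (by simp)]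
      by_cases hd : d ≤ lo
      · rw [show PySem.List.pyRange c d 1 = [] from PySem.List.pyRange_one_eq_nil (by omega),
          List.filter_eq_nil_iff]
        intro x hx
        obtain ⟨hx1, hx2⟩ := PySem.List.mem_pyRange_one.mp hx
        intro hpx
        have := (hp x (by omega) (by omega)).mp hpx
        omega
      · rw [hsplit]
        exact ih (lo + 1) c d (by omega) h2 (by omega)
          (fun x hx1 hx2 => hp x (by omega) (by omega))

theorem bad_eq (a : List Int) (i j : ℕ) (hij : i < j) (hj : j ≤ a.length)
    (hr : AdjInc (revSeg a i j)) :
    badListB a = PySem.List.pyRange ((i : Int) + 1) (j : Int) 1 := by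
  unfold badListB
  rw [show (a.length : Int) = 1 + ((a.length - 1 : ℕ) : Int) from by omega]
  apply filter_pyRange_interval
  · omega
  · omega
  · omega
  · intro x hx1 hx2
    rw [decide_eq_true_eq,
        PySem.List.pyGetD_eq_getElem a 0 (i := x - 1) (by omega) (by omega),
        PySem.List.pyGetD_eq_getElem a 0 (i := x) (by omega) (by omega)]
    have hk : x.toNat < a.length := by omega
    have hval : a[(x-1).toNat]'(by omega) = a[x.toNat - 1]'(by omega) := by congr 1; omega
    rw [hval, bad_char a i j hij hj hr x.toNat (by omega) hk]
    omega

theorem badListB_nil_iff (a : List Int) : badListB a = [] ↔ AdjInc a := by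
  rw [← checkA_iff]
  unfold badListB pyCheckA
  rw [List.filter_eq_nil_iff, List.all_eq_true]
  simp

theorem mem_badListB (a : List Int) (x : Int) (hx : x ∈ badListB a) :
    1 ≤ x ∧ x < (a.length : Int) := by
  unfold badListB at hx
  exact PySem.List.mem_pyRange_one.mp (List.mem_filter.mp hx).1

theorem revSeg_zero_one (a : List Int) (ha : a ≠ []) : revSeg a 0 1 = a := by
  cases a with
  | nil => exact absurd rfl ha
  | cons x t => simp [revSeg]

theorem main_eq (a : List Int) (ha : a ≠ []) : reverseToSort a = reverseToSort_alt a := by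
  have hn : 0 < a.length := List.length_pos_iff.mpr ha
  have hform : reverseToSort_alt a =
      (if badListB a = [] then true
       else if badListB a ≠ PySem.List.pyRange (PySem.List.pyGetD (badListB a) 0 0)
           (PySem.List.pyGetD (badListB a) (-1) 0 + 1) 1 then false
       else pyCheckB (candB a (PySem.List.pyGetD (badListB a) 0 0 - 1)
           (PySem.List.pyGetD (badListB a) (-1) 0 + 1))) := rfl
  by_cases hbad : badListB a = []
  · have hB : reverseToSort_alt a = true := by rw [hform, if_pos hbad]
    have hA : reverseToSort a = true := (A_iff a).mpr ⟨0, 1, hn, Nat.zero_lt_one, hn, by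
      rw [revSeg_zero_one a ha]; exact (badListB_nil_iff a).mp hbad⟩
    rw [hA, hB]
  · by_cases hA : reverseToSort a = true
    · obtain ⟨i, j, hi, hij, hj, hinc⟩ := (A_iff a).mp hA
      have hbe := bad_eq a i j hij hj hinc
      have hlt : i + 1 < j := by
        by_contra h
        exact hbad (hbe.trans (PySem.List.pyRange_one_eq_nil (by omega)))
      have hhead : PySem.List.pyGetD (badListB a) 0 0 = (i:Int) + 1 := by
        rw [hbe, PySem.List.pyRange_one_cons (by omega), PySem.List.pyGetD_zero_cons]
      have hlast : PySem.List.pyGetD (badListB a) (-1) 0 = (j:Int) - 1 := by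
        rw [hbe, show (j:Int) = ((j:Int) - 1) + 1 from by ring,
          PySem.List.pyRange_one_succ_right (by omega),
          PySem.List.pyGetD_neg_one_append_singleton]
        omega
      have hB : reverseToSort_alt a = true := by
        rw [hform, if_neg hbad, hhead, hlast,
          show ((j:Int) - 1) + 1 = (j:Int) from by ring,
          show ((i:Int) + 1) - 1 = (i:Int) from by ring, hbe,
          if_neg (by simp)]
        unfold candB
        rw [slices_int a (i:Int) (j:Int) (by omega) (by omega), Int.toNat_natCast,
          Int.toNat_natCast]
        exact (checkB_iff _).mpr hinc
      rw [hA, hB]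
    · rw [eq_false_of_ne_true hA]
      cases hb : reverseToSort_alt a with
      | false => rfl
      | true =>
        exfalso
        apply hA
        rw [hform, if_neg hbad] at hb
        by_cases hrange : badListB a = PySem.List.pyRange (PySem.List.pyGetD (badListB a) 0 0)
            (PySem.List.pyGetD (badListB a) (-1) 0 + 1) 1
        · rw [if_neg (not_not_intro hrange)] at hb
          set p := PySem.List.pyGetD (badListB a) 0 0 with hp
          set q := PySem.List.pyGetD (badListB a) (-1) 0 with hq
          have hpmem : p ∈ badListB a := by
            rw [hp]
            cases hbl : badListB a with
            | nil => exact absurd hbl hbad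
            | cons y t => rw [PySem.List.pyGetD_zero_cons]; exact List.mem_cons_self
          have hqmem : q ∈ badListB a := by
            rw [hq, PySem.List.pyGetD_neg_one (badListB a) 0 hbad]
            exact List.getLast_mem hbad
          obtain ⟨hp1, hp2⟩ := mem_badListB a p hpmem
          obtain ⟨hq1, hq2⟩ := mem_badListB a q hqmem
          have hpq : p ≤ q := by
            by_contra h
            exact hbad (hrange.trans (PySem.List.pyRange_one_eq_nil (by omega)))
          unfold candB at hb
          rw [slices_int a (p - 1) (q + 1) (by omega) (by omega)] at hb
          exact (A_iff a).mpr ⟨(p-1).toNat, (q+1).toNat, by omega, by omega, by omega,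
            (checkB_iff _).mp hb⟩
        · rw [if_pos hrange] at hb
          exact absurd hb (by simp)

-- ===== VERDICT (by name: the statement is the Claim_ definition above) =====
theorem reverseToSort_spec : Claim_unchanged_reverseToSort := by
  intro a _ hD
  exact main_eq a hD

theorem reverseToSort_changed : Claim_changed_reverseToSort := by
  unfold Claim_changed_reverseToSort; decide

theorem reverseToSort_tight : Claim_exact_reverseToSort := by
  intro a _ hD
  subst hD
  decide
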